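-- pv_equiv track=rewrite | github.com/the-game-bureau/beejumble | scraper.py | calculate_letters_attribute
-- ===== SOURCE A (Python) =====
-- def find_common_letter(words):
--     letter_sets = [set(word) for word in words if word.isalpha()]
--     common = set.intersection(*letter_sets) if letter_sets else set()
--     return sorted(common)[0] if common else None
--
-- def calculate_letters_attribute(words):
--     words = [w.upper() for w in words]
--     common_letter = find_common_letter(words)
--     if not common_letter:
--         return None
--     all_letters = set("".join(words))
--     all_letters.discard(common_letter)
--     other_letters = sorted(all_letters)[:6]
--     return (common_letter + "".join(other_letters)).upper()
-- ===== SOURCE B (Python) =====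
-- def calculate_letters_attribute(words):
--     counts = {}
--     n_alpha = 0
--     chars = set()
--     for w in words:
--         u = w.upper()
--         chars.update(u)
--         if u.isalpha():
--             n_alpha += 1
--             for c in dict.fromkeys(u):
--                 counts[c] = counts.get(c, 0) + 1
--     common = [c for c in counts if counts[c] == n_alpha]
--     if not common:
--         return None
--     cl = min(common)
--     others = sorted(chars - {cl})[:6]
--     return cl + "".join(others)
-- ===== Notes on version B (the rewrite author's own statement) =====
-- stated objective: alternative
-- what changed: Replaces A's build-a-set-per-alpha-word plus set.intersection (and its sorted(...)[0] head) by a single pass that counts, per uppercased alpha word, each distinct letter in a dict; the common letters are those whose count equals the number of alpha words, and the answer letter is min of them; the other-letters set is accumulated incrementally in the same pass.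
import Mathlib
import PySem

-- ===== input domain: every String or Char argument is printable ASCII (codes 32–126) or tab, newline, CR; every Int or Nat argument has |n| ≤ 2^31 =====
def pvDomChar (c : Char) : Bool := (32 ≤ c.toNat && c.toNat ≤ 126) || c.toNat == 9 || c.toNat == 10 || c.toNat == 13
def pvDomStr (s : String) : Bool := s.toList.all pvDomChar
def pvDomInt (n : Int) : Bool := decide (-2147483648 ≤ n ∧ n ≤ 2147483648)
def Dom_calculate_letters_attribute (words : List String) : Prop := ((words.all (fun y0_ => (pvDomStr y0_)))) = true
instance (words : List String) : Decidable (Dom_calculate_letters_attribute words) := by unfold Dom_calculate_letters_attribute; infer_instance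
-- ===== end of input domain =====

-- B replaces A's per-word letter sets + set.intersection by one counting pass (per-word
-- distinct-letter counts; a letter is common iff its count equals the number of alpha words);
-- objective: alternative algorithm, same return value (no speed claim).

-- ===== PORT A =====
def find_common_letter (words : List String) : Option Char :=
  let letter_sets : List (PySem.Set Char) :=
    (words.filter (fun w => PySem.Str.strIsalpha w)).map (fun w => PySem.Set.ofList w.toList)
  let common : PySem.Set Char :=
    match letter_sets with
    | [] => PySem.Set.empty
    | s :: rest => rest.foldl PySem.Set.inter s
  if common = [] then none
  else PySem.List.pyGet? (PySem.List.sorted common (fun x => x) false) 0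

def calculate_letters_attribute (words : List String) : Option String :=
  let words := words.map PySem.Str.upper
  match find_common_letter words with
  | none => none
  | some common_letter =>
    let all_letters : PySem.Set Char := PySem.Set.ofList (PySem.Str.join "" words).toList
    let all_letters := PySem.Set.discard all_letters common_letter
    let other_letters := (PySem.List.sorted all_letters (fun x => x) false).take 6
    some (PySem.Str.upper (String.ofList (common_letter :: other_letters)))

-- ===== PORT B =====
-- loop body of Source B's single pass; state = (counts, n_alpha, chars)
def altStep (acc : PySem.Dict Char Int × Int × PySem.Set Char) (w : String) :
    PySem.Dict Char Int × Int × PySem.Set Char :=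
  let u := PySem.Str.upper w
  let chars := PySem.Set.update acc.2.2 u.toList
  if PySem.Str.strIsalpha u then
    ((PySem.List.dedup u.toList).foldl (fun d c => d.modify c 0 (· + 1)) acc.1,
     acc.2.1 + 1, chars)
  else (acc.1, acc.2.1, chars)

def calculate_letters_attribute_alt (words : List String) : Option String :=
  let st := words.foldl altStep (PySem.Dict.empty, 0, PySem.Set.empty)
  let counts := st.1
  let n_alpha := st.2.1
  let chars := st.2.2
  let common := counts.keys.filter (fun c => counts.getD c 0 == n_alpha)
  match PySem.List.min? common (fun x => x) with
  | none => none
  | some cl =>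
    let others :=
      (PySem.List.sorted (PySem.Set.diff chars (PySem.Set.ofList [cl])) (fun x => x) false).take 6
    some (String.ofList (cl :: others))

-- ===== PRECONDITION & SPEC =====  (A is total: no Pre_)
def Spec_calculate_letters_attribute (words : List String) (out : Option String) : Prop := out = calculate_letters_attribute_alt words
instance (words : List String) (out : Option String) : Decidable (Spec_calculate_letters_attribute words out) := by unfold Spec_calculate_letters_attribute; infer_instance
-- ===== CLAIM (what is proved, stated in full; the proofs are below) =====
def Claim_equal_calculate_letters_attribute : Prop := ∀ (words : List String), Dom_calculate_letters_attribute words → Spec_calculate_letters_attribute words (calculate_letters_attribute words)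

-- ===== LEMMAS AND PROOFS =====
theorem count_flatMap_dedup (c : Char) (ws : List String) :
    (ws.flatMap (fun u => PySem.List.dedup u.toList)).count c
      = ws.countP (fun u => decide (c ∈ u.toList)) := by
  induction ws with
  | nil => rfl
  | cons w ws ih =>
    rw [List.flatMap_cons, List.count_append, ih, List.countP_cons]
    by_cases h : c ∈ w.toList
    · rw [List.count_eq_one_of_mem (PySem.List.nodup_dedup _) (by rw [PySem.List.mem_dedup]; exact h)]
      simp [h]; omega
    · rw [List.count_eq_zero_of_not_mem (by rw [PySem.List.mem_dedup]; exact h)]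
      simp [h]

-- membership in B's common list
theorem mem_commonB (words : List String) (c : Char) :
    (c ∈ ((PySem.Dict.counter (((words.map PySem.Str.upper).filter PySem.Str.strIsalpha).flatMap
              (fun u => PySem.List.dedup u.toList))).keys.filter
           (fun c => (PySem.Dict.counter (((words.map PySem.Str.upper).filter PySem.Str.strIsalpha).flatMap
              (fun u => PySem.List.dedup u.toList))).getD c 0
             == (0 + (((words.map PySem.Str.upper).filter PySem.Str.strIsalpha).length : Int)))))
      ↔ (((words.map PySem.Str.upper).filter PySem.Str.strIsalpha) ≠ [] ∧
          ∀ u ∈ (words.map PySem.Str.upper).filter PySem.Str.strIsalpha, c ∈ u.toList) := by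
  rw [List.mem_filter, PySem.Dict.keys_counter, PySem.Set.mem_ofList, PySem.Dict.getD_counter,
    count_flatMap_dedup, List.mem_flatMap]
  constructor
  · rintro ⟨⟨u, hu, hcu⟩, hbeq⟩
    rw [beq_iff_eq] at hbeq
    have hcount : ((words.map PySem.Str.upper).filter PySem.Str.strIsalpha).countP
        (fun u => decide (c ∈ u.toList))
        = ((words.map PySem.Str.upper).filter PySem.Str.strIsalpha).length := by
      omega
    refine ⟨by intro hnil; rw [hnil] at hu; simp at hu, ?_⟩
    intro u' hu'
    have := List.countP_eq_length.mp hcount u' hu'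
    simpa using this
  · rintro ⟨hne, hall⟩
    obtain ⟨u, hu⟩ : ∃ u, u ∈ (words.map PySem.Str.upper).filter PySem.Str.strIsalpha := by
      rcases h : (words.map PySem.Str.upper).filter PySem.Str.strIsalpha with _ | ⟨u, t⟩
      · exact absurd h hne
      · exact ⟨u, by simp [h]⟩
    refine ⟨⟨u, hu, by rw [PySem.List.mem_dedup]; exact hall u hu⟩, ?_⟩
    rw [beq_iff_eq]
    have hcount : ((words.map PySem.Str.upper).filter PySem.Str.strIsalpha).countP
        (fun u => decide (c ∈ u.toList))
        = ((words.map PySem.Str.upper).filter PySem.Str.strIsalpha).length :=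
      List.countP_eq_length.mpr (fun u' hu' => by simpa using hall u' hu')
    omega


theorem mem_foldl_inter (c : Char) (ts : List (PySem.Set Char)) : ∀ (s : PySem.Set Char),
    (c ∈ ts.foldl PySem.Set.inter s ↔ c ∈ s ∧ ∀ t ∈ ts, c ∈ t) := by
  induction ts with
  | nil => simp
  | cons t ts ih =>
    intro s
    rw [List.foldl_cons, ih, PySem.Set.mem_inter]
    constructor
    · rintro ⟨⟨h1, h2⟩, h3⟩
      refine ⟨h1, fun x hx => ?_⟩
      rw [List.mem_cons] at hx
      rcases hx with rfl | hx
      · exact h2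
      · exact h3 _ hx
    · rintro ⟨h1, h2⟩
      exact ⟨⟨h1, h2 t (by simp)⟩, fun x hx => h2 x (by simp [hx])⟩

theorem mem_commonA (u : String) (rest : List String) (c : Char) :
    (c ∈ (rest.map (fun w => PySem.Set.ofList w.toList)).foldl PySem.Set.inter
        (PySem.Set.ofList u.toList))
      ↔ ∀ w ∈ u :: rest, c ∈ w.toList := by
  rw [mem_foldl_inter, PySem.Set.mem_ofList]
  constructor
  · rintro ⟨h1, h2⟩ w hw
    rw [List.mem_cons] at hw
    rcases hw with rfl | hw
    · exact h1
    · have := h2 (PySem.Set.ofList w.toList) (List.mem_map_of_mem hw)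
      rwa [PySem.Set.mem_ofList] at this
  · intro h
    refine ⟨h u (by simp), fun t ht => ?_⟩
    rw [List.mem_map] at ht
    obtain ⟨w, hw, rfl⟩ := ht
    rw [PySem.Set.mem_ofList]
    exact h w (by simp [hw])

theorem alt_fold (ws : List String) : ∀ (d : PySem.Dict Char Int) (n : Int) (s : PySem.Set Char),
    ws.foldl altStep (d, n, s) =
      ( ((((ws.map PySem.Str.upper).filter PySem.Str.strIsalpha).flatMap
            (fun u => PySem.List.dedup u.toList)).foldl (fun d c => d.modify c 0 (· + 1)) d),
        n + (((ws.map PySem.Str.upper).filter PySem.Str.strIsalpha).length : Int),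
        PySem.Set.update s ((ws.map PySem.Str.upper).flatMap String.toList) ) := by
  induction ws with
  | nil => intro d n s; simp [PySem.Set.update]
  | cons w ws ih =>
    intro d n s
    simp only [List.foldl_cons, List.map_cons, List.flatMap_cons]
    by_cases h : PySem.Str.strIsalpha (PySem.Str.upper w) = true
    · rw [show altStep (d, n, s) w =
        ((PySem.List.dedup (PySem.Str.upper w).toList).foldl (fun d c => d.modify c 0 (· + 1)) d,
         n + 1, PySem.Set.update s (PySem.Str.upper w).toList) from by simp only [altStep, if_pos h]]
      rw [ih, List.filter_cons, if_pos h]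
      simp only [List.flatMap_cons, List.foldl_append, List.length_cons, PySem.Set.update,
        Prod.mk.injEq, true_and, and_true]
      push_cast; ring
    · rw [show altStep (d, n, s) w = (d, n, PySem.Set.update s (PySem.Str.upper w).toList) from by
        simp only [altStep, if_neg h]]
      rw [ih, List.filter_cons, if_neg h]
      simp [PySem.Set.update, List.foldl_append]

theorem join_empty_eq_flatten (xss : List (List Char)) :
    PySem.Chars.join [] xss = xss.flatten := by
  induction xss with
  | nil => simp [PySem.Chars.join_nil]
  | cons a t ih =>
    cases t with
    | nil => rfl
    | cons b t' =>
      rw [PySem.Chars.join_cons_cons, List.flatten_cons,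
        show PySem.Chars.join [] (b :: t') = (b :: t').flatten from ih]
      simp

theorem upperChar_idem (c : Char) :
    PySem.Chars.upperChar (PySem.Chars.upperChar c) = PySem.Chars.upperChar c := by
  have key : ∀ d : Char, PySem.Chars.islower d = true → PySem.Chars.islower (PySem.Chars.upperChar d) = false := by
    intro d hd
    simp only [PySem.Chars.islower, Bool.and_eq_true, decide_eq_true_eq] at hd
    have h9 : 97 ≤ d.toNat ∧ d.toNat ≤ 122 := ⟨hd.1, hd.2⟩
    have hne : ¬ ('a' ≤ Char.ofNat (d.toNat - 32)) := by
      intro h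
      have h97 : 97 ≤ (Char.ofNat (d.toNat - 32)).toNat := h
      rw [Char.toNat_ofNat, if_pos (by left; omega)] at h97
      omega
    simp only [PySem.Chars.upperChar, PySem.Chars.islower, hd, decide_true, Bool.and_self, if_true]
    simp [hne]
  by_cases h : PySem.Chars.islower c = true
  · have h2 := key c h
    conv_lhs => rw [PySem.Chars.upperChar]
    rw [h2]; simp
  · simp only [Bool.not_eq_true] at h
    conv_lhs => rw [show PySem.Chars.upperChar c = c from by simp [PySem.Chars.upperChar, h]]

-- B's fold state, in closed form

theorem min_agree (l₁ l₂ : List Char) (hm : ∀ c, c ∈ l₁ ↔ c ∈ l₂) :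
    (if l₁ = [] then none else PySem.List.pyGet? (PySem.List.sorted l₁ (fun x => x) false) 0)
      = PySem.List.min? l₂ (fun x => x) := by
  by_cases h : l₁ = []
  · subst h
    rw [if_pos rfl]
    have : l₂ = [] := List.eq_nil_iff_forall_not_mem.mpr (fun c hc => by simp [← hm c] at hc)
    subst this; rfl
  · rw [if_neg h]
    obtain ⟨m, t, hs⟩ : ∃ m t, PySem.List.sorted l₁ (fun x => x) false = m :: t := by
      rcases hl : PySem.List.sorted l₁ (fun x => x) false with _ | ⟨m, t⟩
      · exact absurd ((PySem.List.sorted_eq_nil_iff l₁ (fun x => x) false).mp hl) h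
      · exact ⟨m, t, rfl⟩
    rw [hs]
    have hmem : m ∈ l₁ := by
      rw [← PySem.List.mem_sorted l₁ (fun x => x) false m, hs]; simp
    rcases hmin : PySem.List.min? l₂ (fun x => x) with _ | m'
    · rw [PySem.List.min?_eq_none_iff] at hmin
      subst hmin; exact absurd ((hm m).mp hmem) (by simp)
    · have hm'mem : m' ∈ l₂ := PySem.List.min?_mem hmin
      have h1 : m ≤ m' := PySem.List.key_head_sorted_le l₁ (fun x => x) hs m' ((hm m').mpr hm'mem)
      have h2 : m' ≤ m := PySem.List.min?_isMin hmin m ((hm m).mp hmem)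
      have : m = m' := le_antisymm h1 h2
      subst this
      simp [PySem.List.pyGet?, PySem.List.pyIdx?]

theorem upper_fix_all (words : List String) :
    ∀ c ∈ (words.map PySem.Str.upper).flatMap String.toList, PySem.Chars.upperChar c = c := by
  intro c hc
  rw [List.mem_flatMap] at hc
  obtain ⟨u, hu, hcu⟩ := hc
  rw [List.mem_map] at hu
  obtain ⟨w, _, rfl⟩ := hu
  rw [PySem.Str.toList_upper, PySem.Chars.upper, List.mem_map] at hcu
  obtain ⟨d, _, rfl⟩ := hcu
  exact upperChar_idem d

theorem upper_ofList_fixed (l : List Char) (h : ∀ c ∈ l, PySem.Chars.upperChar c = c) :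
    PySem.Str.upper (String.ofList l) = String.ofList l := by
  rw [PySem.Str.upper]
  congr 1
  rw [show (String.ofList l).toList = l from by simp, PySem.Chars.upper]
  calc List.map PySem.Chars.upperChar l = List.map id l := List.map_congr_left h
    _ = l := List.map_id l

theorem join_toList (words : List String) :
    (PySem.Str.join "" words).toList = words.flatMap String.toList := by
  rw [PySem.Str.toList_join, show ("" : String).toList = [] from rfl, join_empty_eq_flatten]
  rw [List.flatMap_def]

theorem diff_singleton_eq_discard (s : PySem.Set Char) (cl : Char) :
    PySem.Set.diff s (PySem.Set.ofList [cl]) = PySem.Set.discard s cl := by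
  have h1 : PySem.Set.ofList [cl] = [cl] := PySem.Set.ofList_eq_self_of_nodup [cl] (List.nodup_singleton cl)
  rw [h1]
  show List.filter _ s = List.filter _ s
  apply List.filter_congr
  intro x _
  rcases Bool.eq_false_or_eq_true (x == cl) with h | h <;>
    simp_all

theorem update_empty_eq_ofList (xs : List Char) :
    PySem.Set.update PySem.Set.empty xs = PySem.Set.ofList xs := by
  rw [PySem.Set.ofList_eq_foldl]
  rfl

-- ===== VERDICT (by name: the statement is the Claim_ definition above) =====
theorem calculate_letters_attribute_spec : Claim_equal_calculate_letters_attribute := by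
  intro words _
  unfold Spec_calculate_letters_attribute
  show calculate_letters_attribute words = calculate_letters_attribute_alt words
  simp only [calculate_letters_attribute, calculate_letters_attribute_alt, find_common_letter]
  rw [alt_fold]
  simp only [← PySem.Dict.counter_eq_foldl, update_empty_eq_ofList]
  rcases hAW : List.filter PySem.Str.strIsalpha (List.map PySem.Str.upper words) with _ | ⟨u, rest⟩
  · rfl
  · rw [List.map_cons]
    have hm : ∀ c : Char,
        (c ∈ (rest.map (fun w => PySem.Set.ofList w.toList)).foldl PySem.Set.inter
            (PySem.Set.ofList u.toList)) ↔
        (c ∈ ((PySem.Dict.counter ((u :: rest).flatMap (fun u => PySem.List.dedup u.toList))).keys.filter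
           (fun c => (PySem.Dict.counter ((u :: rest).flatMap (fun u => PySem.List.dedup u.toList))).getD c 0
             == (0 + ((u :: rest).length : Int))))) := by
      intro c
      have hB := mem_commonB words c
      rw [hAW] at hB
      rw [mem_commonA u rest c, hB]
      simp
    rw [show (match PySem.Set.ofList u.toList :: List.map (fun w => PySem.Set.ofList w.toList) rest with
          | [] => PySem.Set.empty
          | s :: rest => List.foldl PySem.Set.inter s rest)
        = (rest.map (fun w => PySem.Set.ofList w.toList)).foldl PySem.Set.inter
            (PySem.Set.ofList u.toList) from rfl]
    rw [min_agree _ _ hm]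
    rcases hmin : PySem.List.min?
        ((PySem.Dict.counter ((u :: rest).flatMap (fun u => PySem.List.dedup u.toList))).keys.filter
           (fun c => (PySem.Dict.counter ((u :: rest).flatMap (fun u => PySem.List.dedup u.toList))).getD c 0
             == (0 + ((u :: rest).length : Int)))) (fun x => x) with _ | cl
    · rw [hmin]
    · rw [hmin]
      simp only
      rw [join_toList, diff_singleton_eq_discard]
      have hcl : cl ∈ (words.map PySem.Str.upper).flatMap String.toList := by
        have hclmem := PySem.List.min?_mem hmin
        have hB := (mem_commonB words cl)
        rw [hAW] at hB
        have := hB.mp hclmem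
        have hu : u ∈ List.filter PySem.Str.strIsalpha (List.map PySem.Str.upper words) := by
          rw [hAW]; simp
        rw [List.mem_flatMap]
        exact ⟨u, List.mem_of_mem_filter hu, this.2 u (by simp)⟩
      congr 1
      apply upper_ofList_fixed
      intro c hc
      rw [List.mem_cons] at hc
      rcases hc with rfl | hc
      · exact upper_fix_all words c hcl
      · have h1 := List.take_subset 6 _ hc
        rw [PySem.List.mem_sorted] at h1
        rw [PySem.Set.mem_discard] at h1
        rw [PySem.Set.mem_ofList] at h1
        exact upper_fix_all words c h1.1
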